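-- pv_equiv track=rewrite | github.com/ponpeinieh/ipynb | zerojudge_leetcode/arithmetic1.py | doPlusAndMinusCalc
-- ===== SOURCE A (Python) =====
-- def doPlusAndMinusCalc(tokens):
--     if len(tokens) == 1:
--         return int(tokens[0])
--     i = 0
--     num1 = None
--     num2 = None
--     op = None
--     result = None
--     while i < len(tokens):
--         t = tokens[i]
--         i += 1
--         if t.isdigit():
--             if num1 == None:
--                 num1 = t
--             else:
--                 num2 = t
--                 result = doMath(num1, num2, op)
--                 num1 = result
--         elif t in "+-":
--             op = t
--     return int(num1)
--
-- def doMath(num1, num2, op):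
--     num1 = int(num1)
--     num2 = int(num2)
--     if op == '+':
--         result = num1+num2
--     elif op == '-':
--         result = num1-num2
--     elif op == '*':
--         result = num1*num2
--     elif op == '/':
--         result = num1//num2
--     elif op == '%':
--         result = num1 % num2
--     return str(result)
-- ===== SOURCE B (Python) =====
-- def doPlusAndMinusCalc(tokens):
--     if len(tokens) == 1:
--         return int(tokens[0])
--     # pass 1: collect each number token together with the operator in force at that point
--     pairs = []
--     op = None
--     for t in tokens:
--         if t.isdigit():
--             pairs.append((t, op))
--         elif t in "+-":
--             op = t
--     # pass 2: fold doMath over the collected pairs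
--     acc = pairs[0][0] if pairs else None
--     for n, o in pairs[1:]:
--         acc = doMath(acc, n, o)
--     return int(acc)
--
-- def doMath(num1, num2, op):
--     num1 = int(num1)
--     num2 = int(num2)
--     if op == '+':
--         result = num1+num2
--     elif op == '-':
--         result = num1-num2
--     elif op == '*':
--         result = num1*num2
--     elif op == '/':
--         result = num1//num2
--     elif op == '%':
--         result = num1 % num2
--     return str(result)
-- ===== Notes on version B (the rewrite author's own statement) =====
-- stated objective: alternative
-- what changed: A's single stateful while-loop (num1/num2/op mutated in place, arithmetic interleaved) is replaced by a two-phase decomposition: a first pass collects each number token paired with the operator in force, a second pass folds doMath over pairs[1:] starting from pairs[0].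
import Mathlib
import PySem

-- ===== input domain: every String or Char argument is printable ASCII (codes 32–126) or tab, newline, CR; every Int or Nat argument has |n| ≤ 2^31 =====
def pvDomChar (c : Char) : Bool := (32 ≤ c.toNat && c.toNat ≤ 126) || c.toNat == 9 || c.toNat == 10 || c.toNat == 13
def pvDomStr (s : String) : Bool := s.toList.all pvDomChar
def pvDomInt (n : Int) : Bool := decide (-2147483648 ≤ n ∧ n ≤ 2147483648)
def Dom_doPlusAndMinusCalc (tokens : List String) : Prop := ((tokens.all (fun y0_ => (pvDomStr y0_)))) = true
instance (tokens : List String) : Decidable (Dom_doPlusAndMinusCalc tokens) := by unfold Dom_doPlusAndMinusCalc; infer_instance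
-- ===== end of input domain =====

-- B replaces A's single stateful while-loop by a two-phase decomposition (collect number/operator
-- pairs, then fold doMath over them); same cost, objective: alternative decomposition.

-- shared module helper doMath (used verbatim by both Python versions).
-- Option String: `none` is exactly where the Python doMath raises (unknown op / zero divisor).
-- The Python `int(num1)`/`int(num2)` never raise on the strings doMath receives here (digit
-- tokens or str(result)); the `getD 0`-free Option match keeps parse failure as `none` too.
def doMathP (num1 num2 : String) (op : Option String) : Option String :=
  match PySem.Int.ofStr? num1, PySem.Int.ofStr? num2 with
  | some a, some b =>
      if op = some "+" then some (PySem.Int.toStr (a + b))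
      else if op = some "-" then some (PySem.Int.toStr (a - b))
      else if op = some "*" then some (PySem.Int.toStr (a * b))
      else if op = some "/" then (PySem.Int.floordiv? a b).map PySem.Int.toStr
      else if op = some "%" then (PySem.Int.mod? a b).map PySem.Int.toStr
      else none
  | _, _ => none

-- ===== PORT A =====
-- A's while-loop over the tokens; state (num1, num2, op) as in the Python.
-- result: none = an exception inside the loop; some num1 = the final num1.
def loopA : List String → Option String → Option String → Option String → Option (Option String)
  | [], num1, _, _ => some num1
  | t :: rest, num1, num2, op =>
    if PySem.Str.strIsdigit t then
      match num1 with
      | none => loopA rest (some t) num2 op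
      | some n1 =>
        match doMathP n1 t op with
        | none => none
        | some r => loopA rest (some r) (some t) op
    else if PySem.Str.isIn t "+-" then loopA rest num1 num2 (some t)
    else loopA rest num1 num2 op

-- `0` stands only where the Python raises (excluded by Pre_): int(None)/doMath exceptions.
def doPlusAndMinusCalc (tokens : List String) : Int :=
  if tokens.length = 1 then
    match PySem.List.pyGet? tokens 0 with
    | some t => (PySem.Int.ofStr? t).getD 0
    | none => 0
  else
    match loopA tokens none none none with
    | some (some s) => (PySem.Int.ofStr? s).getD 0
    | _ => 0

-- ===== PORT B =====
-- pass 1: each digit token paired with the operator in force when it was seen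
def collectB : List String → Option String → List (String × Option String)
  | [], _ => []
  | t :: rest, op =>
    if PySem.Str.strIsdigit t then (t, op) :: collectB rest op
    else if PySem.Str.isIn t "+-" then collectB rest (some t)
    else collectB rest op

-- `0` stands only where the Python raises (excluded by Pre_): int(None)/doMath exceptions.
def doPlusAndMinusCalc_alt (tokens : List String) : Int :=
  if tokens.length = 1 then
    match PySem.List.pyGet? tokens 0 with
    | some t => (PySem.Int.ofStr? t).getD 0
    | none => 0
  else
    match collectB tokens none with
    | [] => 0
    | (n0, _) :: rest =>
      -- pass 2: fold doMath over the remaining pairs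
      match rest.foldl (fun acc p => acc.bind (fun a => doMathP a p.1 p.2)) (some n0) with
      | some s => (PySem.Int.ofStr? s).getD 0
      | none => 0

-- ===== PRECONDITION & SPEC =====
-- Pre_ = exactly the inputs where the Python A returns: a lone token must parse as int;
-- otherwise there must be a digit token, and when a second (or later) digit token arrives the
-- operator most recently recorded must be "+" or "-" (else doMath raises; no digit → int(None)).
-- preScan only checks this well-formedness (two booleans: digit seen, current op is "+"/"-").
def preScan : List String → Bool → Bool → Bool
  | [], seen, _ => seen
  | t :: rest, seen, ok =>
    if PySem.Str.strIsdigit t then (!seen || ok) && preScan rest true ok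
    else if PySem.Str.isIn t "+-" then preScan rest seen (t == "+" || t == "-")
    else preScan rest seen ok

def Pre_doPlusAndMinusCalc (tokens : List String) : Prop :=
  if tokens.length = 1 then (PySem.Int.ofStr? ((PySem.List.pyGet? tokens 0).getD "")).isSome = true
  else preScan tokens false false = true
instance (tokens : List String) : Decidable (Pre_doPlusAndMinusCalc tokens) := by
  unfold Pre_doPlusAndMinusCalc; infer_instance

def pvWitness_doPlusAndMinusCalc : List String := ["1", "+", "2", "-", "40"]

def Spec_doPlusAndMinusCalc (tokens : List String) (out : Int) : Prop := out = doPlusAndMinusCalc_alt tokens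
instance (tokens : List String) (out : Int) : Decidable (Spec_doPlusAndMinusCalc tokens out) := by unfold Spec_doPlusAndMinusCalc; infer_instance

-- ===== CLAIM (what is proved, stated in full; the proofs are below) =====
def Claim_equal_doPlusAndMinusCalc : Prop := ∀ (tokens : List String), Dom_doPlusAndMinusCalc tokens → Pre_doPlusAndMinusCalc tokens → Spec_doPlusAndMinusCalc tokens (doPlusAndMinusCalc tokens)

-- ===== LEMMAS AND PROOFS =====

-- A's loop from a state with num1 already set is B's fold over the pairs still to be collected.
theorem loopA_some (ts : List String) : ∀ (s : String) (num2 op : Option String),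
    loopA ts (some s) num2 op =
      ((collectB ts op).foldl (fun acc p => acc.bind (fun a => doMathP a p.1 p.2)) (some s)).map some := by
  induction ts with
  | nil => intro s num2 op; simp [loopA, collectB]
  | cons t rest ih =>
    intro s num2 op
    simp only [loopA, collectB, PySem.Str.strIsdigit_eq, PySem.Str.isIn_eq]
    by_cases hd : PySem.Chars.strIsdigit t.toList = true
    · simp only [hd, if_true, List.foldl_cons]
      cases hm : doMathP s t op with
      | none =>
        simp only [Option.bind_some, hm]
        clear ih hm
        induction collectB rest op with
        | nil => simp
        | cons q qs ihq => simpa using ihq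
      | some r => simp [ih, hm]
    · by_cases ho : PySem.Chars.isIn t.toList ['+', '-'] = true
      · simp [hd, ho, ih]
      · simp [hd, ho, ih]

-- A's loop from the start state is B's "head pair, then fold" on the collected pairs.
theorem loopA_none (ts : List String) : ∀ (num2 op : Option String),
    loopA ts none num2 op =
      match collectB ts op with
      | [] => some none
      | (n0, _) :: rest =>
        (rest.foldl (fun acc p => acc.bind (fun a => doMathP a p.1 p.2)) (some n0)).map some := by
  induction ts with
  | nil => intro num2 op; simp [loopA, collectB]
  | cons t rest ih =>
    intro num2 op
    simp only [loopA, collectB, PySem.Str.strIsdigit_eq, PySem.Str.isIn_eq]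
    by_cases hd : PySem.Chars.strIsdigit t.toList = true
    · simp [hd, loopA_some]
    · by_cases ho : PySem.Chars.isIn t.toList ['+', '-'] = true
      · simp [hd, ho, ih]
      · simp [hd, ho, ih]

-- ===== VERDICT (by name: the statement is the Claim_ definition above) =====
theorem doPlusAndMinusCalc_spec : Claim_equal_doPlusAndMinusCalc := by
  intro tokens _ _
  unfold Spec_doPlusAndMinusCalc doPlusAndMinusCalc doPlusAndMinusCalc_alt
  by_cases h1 : tokens.length = 1
  · simp [h1]
  · simp only [h1, if_false, loopA_none]
    cases hc : collectB tokens none with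
    | nil => rfl
    | cons p rest =>
      obtain ⟨n0, op0⟩ := p
      cases hf : rest.foldl (fun acc p => acc.bind (fun a => doMathP a p.1 p.2)) (some n0) with
      | none => simp [hf]
      | some s => simp [hf]
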